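-- pv_equiv track=rewrite | github.com/polowiper/DokkanWTBot | main.py | find_gap
-- ===== SOURCE A (Python) =====
-- def find_gap(main_player, data):
--     main_rank = main_player["ranks"][-1]
--     top, bottom = None, None
--     for player in data:
--         if player["ranks"][-1] == (main_rank - 1):
--             top = player
--         if player["ranks"][-1] == (main_rank + 1):
--             bottom = player
--     return top, bottom
-- ===== SOURCE B (Python) =====
-- def find_gap(main_player, data):
--     main_rank = main_player["ranks"][-1]
--
--     def rsearch(target):
--         # first match scanning backwards == A's last match scanning forwards
--         for player in reversed(data):
--             if player["ranks"][-1] == target: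
--                 return player
--         return None
--
--     return rsearch(main_rank - 1), rsearch(main_rank + 1)
-- ===== Notes on version B (the rewrite author's own statement) =====
-- stated objective: alternative
-- what changed: Replaces the single forward pass maintaining two last-match accumulators with two staged reverse-order early-exit searches (first match scanning backwards = A's last match forwards), eliminating the accumulators entirely.
import Mathlib
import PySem

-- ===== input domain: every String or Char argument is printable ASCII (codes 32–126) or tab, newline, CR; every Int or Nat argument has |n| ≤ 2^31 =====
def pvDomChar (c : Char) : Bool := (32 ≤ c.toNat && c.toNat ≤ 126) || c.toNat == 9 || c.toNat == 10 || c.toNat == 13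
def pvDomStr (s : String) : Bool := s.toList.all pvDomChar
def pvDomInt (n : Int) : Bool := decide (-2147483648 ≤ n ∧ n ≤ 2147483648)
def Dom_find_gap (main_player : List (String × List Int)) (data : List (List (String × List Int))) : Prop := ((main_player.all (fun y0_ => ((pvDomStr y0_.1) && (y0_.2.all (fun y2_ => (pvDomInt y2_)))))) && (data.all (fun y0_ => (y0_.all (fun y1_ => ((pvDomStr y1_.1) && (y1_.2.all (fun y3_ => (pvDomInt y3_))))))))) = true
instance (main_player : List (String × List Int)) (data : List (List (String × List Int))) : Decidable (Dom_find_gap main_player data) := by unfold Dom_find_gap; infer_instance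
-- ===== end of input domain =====

-- B replaces A's forward pass with two accumulators by two reverse-order early-exit
-- searches (first match backwards = A's last match forwards); return values agree on Pre_.

-- shared accessor: player["ranks"][-1]; total with a default never reached inside Pre_
def pvLastRank (p : List (String × List Int)) : Int :=
  (((PySem.Dict.mk p).get? "ranks").getD []).getLast?.getD 0

-- ===== PORT A =====
def findGapLoop (mr : Int) (data : List (List (String × List Int)))
    (top bottom : Option (List (String × List Int))) :
    (Option (List (String × List Int))) × (Option (List (String × List Int))) :=
  match data with
  | [] => (top, bottom)
  | p :: rest =>
      let top := if pvLastRank p = mr - 1 then some p else top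
      let bottom := if pvLastRank p = mr + 1 then some p else bottom
      findGapLoop mr rest top bottom

def find_gap (main_player : List (String × List Int)) (data : List (List (String × List Int))) : (Option (List (String × List Int))) × (Option (List (String × List Int))) :=
  findGapLoop (pvLastRank main_player) data none none

-- ===== PORT B =====
-- rsearch: first match while scanning the reversed list, early exit
def pvRSearch (data : List (List (String × List Int))) (target : Int) :
    Option (List (String × List Int)) :=
  data.reverse.find? (fun p => pvLastRank p == target)

def find_gap_alt (main_player : List (String × List Int)) (data : List (List (String × List Int))) : (Option (List (String × List Int))) × (Option (List (String × List Int))) :=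
  let mr := pvLastRank main_player
  (pvRSearch data (mr - 1), pvRSearch data (mr + 1))

-- ===== PRECONDITION & SPEC =====
-- Pre_ excludes exactly the inputs where the Python raises: main_player or some player in
-- data lacking a "ranks" key or having an empty ranks list (KeyError/IndexError).
def pvHasRank (p : List (String × List Int)) : Bool :=
  match (PySem.Dict.mk p).get? "ranks" with
  | some rs => !rs.isEmpty
  | none => false

def Pre_find_gap (main_player : List (String × List Int)) (data : List (List (String × List Int))) : Prop :=
  pvHasRank main_player = true ∧ data.all pvHasRank = true
instance (main_player : List (String × List Int)) (data : List (List (String × List Int))) : Decidable (Pre_find_gap main_player data) := by unfold Pre_find_gap; infer_instance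

def pvWitness_find_gap : (List (String × List Int)) × (List (List (String × List Int))) :=
  ([("ranks", [5])], [[("ranks", [4])], [("ranks", [6])], [("ranks", [4])]])

def Spec_find_gap (main_player : List (String × List Int)) (data : List (List (String × List Int))) (out : (Option (List (String × List Int))) × (Option (List (String × List Int)))) : Prop := out = find_gap_alt main_player data
instance (main_player : List (String × List Int)) (data : List (List (String × List Int))) (out : (Option (List (String × List Int))) × (Option (List (String × List Int)))) : Decidable (Spec_find_gap main_player data out) := by unfold Spec_find_gap; infer_instance

-- ===== CLAIM (what is proved, stated in full; the proofs are below) =====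
def Claim_equal_find_gap : Prop := ∀ (main_player : List (String × List Int)) (data : List (List (String × List Int))), Dom_find_gap main_player data → Pre_find_gap main_player data → Spec_find_gap main_player data (find_gap main_player data)

-- ===== LEMMAS AND PROOFS =====
lemma findGapLoop_eq_rsearch (mr : Int) (data : List (List (String × List Int)))
    (top bottom : Option (List (String × List Int))) :
    findGapLoop mr data top bottom =
      ((data.reverse.find? (fun p => pvLastRank p == mr - 1)).elim top some,
       (data.reverse.find? (fun p => pvLastRank p == mr + 1)).elim bottom some) := by
  induction data generalizing top bottom with
  | nil => rfl
  | cons p rest ih =>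
      simp only [findGapLoop, List.reverse_cons, List.find?_append, ih]
      cases h1 : rest.reverse.find? (fun q => pvLastRank q == mr - 1) <;>
      cases h2 : rest.reverse.find? (fun q => pvLastRank q == mr + 1) <;>
        simp only [Option.or, List.find?, Prod.mk.injEq] <;>
        cases hp1 : pvLastRank p == mr - 1 <;>
        cases hp2 : pvLastRank p == mr + 1 <;>
        simp_all [beq_iff_eq]

-- ===== VERDICT (by name: the statement is the Claim_ definition above) =====
theorem find_gap_spec : Claim_equal_find_gap := by
  intro main_player data _ _
  unfold Spec_find_gap find_gap find_gap_alt pvRSearch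
  simp [findGapLoop_eq_rsearch]
  constructor <;> (cases List.find? _ data.reverse <;> simp)  -- o.elim none some = o
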